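-- pv_equiv track=rewrite | github.com/Meme-Theory/rclab-exflation | computations/s45_sakharov_dissolution.py | N_PW
-- ===== SOURCE A (Python) =====
-- def dim_pq(p, q):
--     return (p + 1) * (q + 1) * (p + q + 2) // 2
--
-- def N_PW(L_max):
--     """Total Hilbert space dimension at truncation p+q <= L_max."""
--     total = 0
--     n_sec = 0
--     for p in range(L_max + 1):
--         for q in range(L_max + 1 - p):
--             d = dim_pq(p, q)
--             total += 16 * d
--             n_sec += 1
--     return total, n_sec
-- ===== SOURCE B (Python) =====
-- def N_PW(L_max):
--     """Total Hilbert space dimension at truncation p+q <= L_max."""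
--     if L_max < 0:
--         return 0, 0
--     M = L_max + 2
--     total = 16 * ((M - 1) * M * (M + 1) * (M + 2) * (2 * M + 1) // 120)
--     n_sec = (L_max + 1) * (L_max + 2) // 2
--     return total, n_sec
-- ===== Notes on version B (the rewrite author's own statement) =====
-- stated objective: faster
-- what changed: Replaced the quadratic double loop over the p+q<=L_max triangle by a closed-form Faulhaber-style polynomial for both the dimension total and the sector count.
import Mathlib
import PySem

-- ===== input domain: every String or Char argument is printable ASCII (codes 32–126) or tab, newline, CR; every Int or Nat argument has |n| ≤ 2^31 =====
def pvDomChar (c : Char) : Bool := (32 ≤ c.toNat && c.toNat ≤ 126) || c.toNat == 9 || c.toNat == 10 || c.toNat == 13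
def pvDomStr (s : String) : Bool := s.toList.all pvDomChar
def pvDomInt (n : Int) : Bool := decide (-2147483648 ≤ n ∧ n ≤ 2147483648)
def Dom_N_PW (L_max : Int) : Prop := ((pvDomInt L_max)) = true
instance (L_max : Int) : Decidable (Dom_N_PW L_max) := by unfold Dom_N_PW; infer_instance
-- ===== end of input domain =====

-- B replaces A's double loop over the p+q <= L_max triangle by a closed-form polynomial (objective: faster).

-- ===== PORT A =====
def pvDimPq (p q : Int) : Int :=
  PySem.Int.floordiv ((p + 1) * (q + 1) * (p + q + 2)) 2

def N_PW (L_max : Int) : List Int :=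
  let r :=
    (PySem.List.pyRange 0 (L_max + 1) 1).foldl
      (fun (st : Int × Int) p =>
        (PySem.List.pyRange 0 (L_max + 1 - p) 1).foldl
          (fun (st : Int × Int) q => (st.1 + 16 * pvDimPq p q, st.2 + 1)) st)
      (0, 0)
  [r.1, r.2]

-- ===== PORT B =====
def N_PW_alt (L_max : Int) : List Int :=
  if L_max < 0 then [0, 0]
  else
    let M := L_max + 2
    let total := 16 * PySem.Int.floordiv ((M - 1) * M * (M + 1) * (M + 2) * (2 * M + 1)) 120
    let n_sec := PySem.Int.floordiv ((L_max + 1) * (L_max + 2)) 2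
    [total, n_sec]

-- ===== PRECONDITION & SPEC =====
def Spec_N_PW (L_max : Int) (out : List Int) : Prop := out = N_PW_alt L_max
instance (L_max : Int) (out : List Int) : Decidable (Spec_N_PW L_max out) := by unfold Spec_N_PW; infer_instance

-- ===== CLAIM (what is proved, stated in full; the proofs are below) =====
def Claim_equal_N_PW : Prop := ∀ (L_max : Int), Dom_N_PW L_max → Spec_N_PW L_max (N_PW L_max)

-- ===== LEMMAS AND PROOFS =====

-- a pairwise-additive foldl is a pair of mapped sums
theorem pv_foldl_pair (f g : Int → Int) (l : List Int) (a b : Int) :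
    l.foldl (fun st x => (st.1 + f x, st.2 + g x)) (a, b)
      = (a + (l.map f).sum, b + (l.map g).sum) := by
  induction l generalizing a b with
  | nil => simp
  | cons x xs ih => simp [ih, add_assoc]

-- bridge list sums over `List.range` to `Finset.range`
theorem pv_sum_map_range (g : Nat → Int) (m : Nat) :
    ((List.range m).map g).sum = ∑ i ∈ Finset.range m, g i := by
  induction m with
  | zero => simp
  | succ k ih => simp [List.range_succ, Finset.sum_range_succ, ih]

-- mapped sum over a pyRange starting at 0 is a Finset.range sum
theorem pv_pyRange_sum (c : Int) (f : Int → Int) :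
    ((PySem.List.pyRange 0 c 1).map f).sum = ∑ i ∈ Finset.range c.toNat, f (i : Int) := by
  rw [PySem.List.pyRange_one, List.map_map, pv_sum_map_range]
  exact Finset.sum_congr (by simp) (fun i _ => by simp)

-- 2 * dim_pq = (p+1)(q+1)(p+q+2): the product is even, so the Python `// 2` is exact
theorem pv_dim2 (p q : Int) : 2 * pvDimPq p q = (p + 1) * (q + 1) * (p + q + 2) := by
  have he : Even ((p + 1) * (q + 1) * (p + q + 2)) := by
    rcases Int.even_or_odd p with hp | hp
    · rcases Int.even_or_odd q with hq | hq
      · obtain ⟨a, ha⟩ := hp; obtain ⟨b, hb⟩ := hq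
        exact ⟨(a + a + 1) * (b + b + 1) * (a + b + 1), by subst ha hb; ring⟩
      · obtain ⟨b, hb⟩ := hq
        exact ⟨(p + 1) * (b + 1) * (p + q + 2), by subst hb; ring⟩
    · obtain ⟨a, ha⟩ := hp
      exact ⟨(a + 1) * (q + 1) * (p + q + 2), by subst ha; ring⟩
  obtain ⟨k, hk⟩ := he
  rw [pvDimPq, hk, PySem.Int.floordiv_eq_ediv_of_pos (by norm_num)]
  have h2 : k + k = 2 * k := by ring
  rw [h2, Int.mul_ediv_cancel_left _ (by norm_num)]

-- Gauss-type sum ∑_{p<k} (c - p), scaled by 2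
theorem pv_sum_lin (c : Int) (k : Nat) :
    2 * (∑ p ∈ Finset.range k, (c - (p : Int))) = (k : Int) * (2 * c - k + 1) := by
  induction k with
  | zero => simp
  | succ m ih => rw [Finset.sum_range_succ]; push_cast; push_cast at ih; linarith

-- ∑_{p<k} (p+1), scaled by 2
theorem pv_sum_succ (k : Nat) :
    2 * (∑ p ∈ Finset.range k, ((p : Int) + 1)) = (k : Int) * (k + 1) := by
  induction k with
  | zero => simp
  | succ m ih => rw [Finset.sum_range_succ]; push_cast; push_cast at ih; linarith

-- anti-diagonal weight sum ∑_{p<=k} (p+1)(k+1-p), scaled by 6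
theorem pv_sum_W (k : Nat) :
    6 * (∑ p ∈ Finset.range (k + 1), ((p : Int) + 1) * ((k : Int) + 1 - p))
      = (k + 1 : Int) * (k + 2) * (k + 3) := by
  induction k with
  | zero => simp
  | succ m ih =>
    push_cast
    simp only [show ((m : Int) + 1 + 1) = (m : Int) + 2 from by ring]
    have hsplit :
        (∑ p ∈ Finset.range (m + 2), ((p : Int) + 1) * ((m : Int) + 2 - p))
          = (∑ p ∈ Finset.range (m + 2), (((p : Int) + 1) * ((m : Int) + 1 - p) + ((p : Int) + 1))) := by
      refine Finset.sum_congr rfl (fun p _ => by ring)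
    have hzero :
        (∑ p ∈ Finset.range (m + 2), ((p : Int) + 1) * ((m : Int) + 1 - p))
          = ∑ p ∈ Finset.range (m + 1), ((p : Int) + 1) * ((m : Int) + 1 - p) := by
      rw [Finset.sum_range_succ]
      have h0 : (((m + 1 : Nat) : Int) + 1) * ((m : Int) + 1 - ((m + 1 : Nat) : Int)) = 0 := by
        push_cast; ring
      rw [h0, add_zero]
    have h1 := pv_sum_succ (m + 2)
    push_cast at h1
    rw [hsplit, Finset.sum_add_distrib, hzero]
    linear_combination ih + 3 * h1

-- the nested triangle sum of the full product (p+1)(q+1)(p+q+2), scaled by 60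
theorem pv_sum_T (n : Nat) :
    60 * (∑ p ∈ Finset.range (n + 1),
            ∑ q ∈ Finset.range (n + 1 - p),
              ((p : Int) + 1) * ((q : Int) + 1) * ((p : Int) + (q : Int) + 2))
      = (n + 1 : Int) * (n + 2) * (n + 3) * (n + 4) * (2 * n + 5) := by
  induction n with
  | zero => norm_num [Finset.sum_range_succ]
  | succ m ih =>
    push_cast
    simp only [show ((m : Int) + 1 + 1) = (m : Int) + 2 from by ring,
               show ((m : Int) + 1 + 2) = (m : Int) + 3 from by ring,
               show ((m : Int) + 1 + 3) = (m : Int) + 4 from by ring,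
               show ((m : Int) + 1 + 4) = (m : Int) + 5 from by ring]
    have hinner : ∀ p ∈ Finset.range (m + 1),
        (∑ q ∈ Finset.range (m + 1 + 1 - p),
            ((p : Int) + 1) * ((q : Int) + 1) * ((p : Int) + (q : Int) + 2))
          = (∑ q ∈ Finset.range (m + 1 - p),
              ((p : Int) + 1) * ((q : Int) + 1) * ((p : Int) + (q : Int) + 2))
            + ((m : Int) + 3) * (((p : Int) + 1) * ((m : Int) + 2 - p)) := by
      intro p hp
      have hple : p ≤ m := Nat.lt_succ_iff.mp (Finset.mem_range.mp hp)
      have h2 : m + 1 + 1 - p = (m + 1 - p) + 1 := by omega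
      rw [h2, Finset.sum_range_succ]
      have hc : ((m + 1 - p : Nat) : Int) = (m : Int) + 1 - p := by
        push_cast [Nat.cast_sub (by omega : p ≤ m + 1)]; ring
      rw [hc]; ring
    rw [Finset.sum_range_succ, Finset.sum_congr rfl hinner, Finset.sum_add_distrib,
        ← Finset.mul_sum]
    have hlast : (∑ q ∈ Finset.range (m + 1 + 1 - (m + 1)),
        (((m + 1 : Nat) : Int) + 1) * ((q : Int) + 1) * (((m + 1 : Nat) : Int) + (q : Int) + 2))
        = ((m : Int) + 3) * (((m : Int) + 2) * 1) := by
      have h1 : m + 1 + 1 - (m + 1) = 1 := by omega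
      rw [h1, Finset.sum_range_one]; push_cast; ring
    rw [hlast]
    have hW := pv_sum_W (m + 1)
    push_cast at hW
    simp only [show ((m : Int) + 1 + 1) = (m : Int) + 2 from by ring,
               show ((m : Int) + 1 + 2) = (m : Int) + 3 from by ring,
               show ((m : Int) + 1 + 3) = (m : Int) + 4 from by ring] at hW
    simp only [show m + 1 + 1 = m + 2 from rfl] at hW
    have hWsplit :
        (∑ p ∈ Finset.range (m + 2), ((p : Int) + 1) * ((m : Int) + 2 - p))
          = (∑ p ∈ Finset.range (m + 1), ((p : Int) + 1) * ((m : Int) + 2 - p)) + ((m : Int) + 2) * 1 := by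
      rw [Finset.sum_range_succ]; push_cast; ring
    linear_combination ih + 10 * ((m : Int) + 3) * hW - 60 * ((m : Int) + 3) * hWsplit

-- N_PW unfolded into a pair of mapped sums over pyRange
theorem pv_N_PW_sums (L : Int) :
    N_PW L = [((PySem.List.pyRange 0 (L + 1) 1).map (fun p =>
                  ((PySem.List.pyRange 0 (L + 1 - p) 1).map (fun q => 16 * pvDimPq p q)).sum)).sum,
              ((PySem.List.pyRange 0 (L + 1) 1).map (fun p =>
                  ((PySem.List.pyRange 0 (L + 1 - p) 1).map (fun _ => (1 : Int))).sum)).sum] := by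
  unfold N_PW
  have hfun : (fun (st : Int × Int) p =>
        (PySem.List.pyRange 0 (L + 1 - p) 1).foldl
          (fun (st : Int × Int) q => (st.1 + 16 * pvDimPq p q, st.2 + 1)) st)
      = (fun (st : Int × Int) p =>
          (st.1 + ((PySem.List.pyRange 0 (L + 1 - p) 1).map (fun q => 16 * pvDimPq p q)).sum,
           st.2 + ((PySem.List.pyRange 0 (L + 1 - p) 1).map (fun _ => (1 : Int))).sum)) := by
    funext st p
    rcases st with ⟨a, b⟩
    exact pv_foldl_pair (fun q => 16 * pvDimPq p q) (fun _ => (1 : Int)) _ a b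
  rw [hfun, pv_foldl_pair (l := PySem.List.pyRange 0 (L + 1) 1)
        (f := fun p => ((PySem.List.pyRange 0 (L + 1 - p) 1).map (fun q => 16 * pvDimPq p q)).sum)
        (g := fun p => ((PySem.List.pyRange 0 (L + 1 - p) 1).map (fun _ => (1 : Int))).sum) 0 0]
  simp

-- main nonnegative case: A's nested sums equal B's closed form
theorem pv_main (n : Nat) : N_PW (n : Int) = N_PW_alt (n : Int) := by
  rw [pv_N_PW_sums]
  -- reduce both mapped pyRange sums to Finset sums
  rw [pv_pyRange_sum ((n : Int) + 1)
        (fun p => ((PySem.List.pyRange 0 ((n : Int) + 1 - p) 1).map (fun q => 16 * pvDimPq p q)).sum),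
      pv_pyRange_sum ((n : Int) + 1)
        (fun p => ((PySem.List.pyRange 0 ((n : Int) + 1 - p) 1).map (fun _ => (1 : Int))).sum)]
  have htn : ((n : Int) + 1).toNat = n + 1 := by omega
  rw [htn]
  have hinner1 : ∀ p ∈ Finset.range (n + 1),
      ((PySem.List.pyRange 0 ((n : Int) + 1 - (p : Int)) 1).map (fun q => 16 * pvDimPq p q)).sum
        = ∑ q ∈ Finset.range (n + 1 - p), 16 * pvDimPq (p : Int) (q : Int) := by
    intro p hp
    have hple : p ≤ n := Nat.lt_succ_iff.mp (Finset.mem_range.mp hp)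
    rw [pv_pyRange_sum]
    have : ((n : Int) + 1 - (p : Int)).toNat = n + 1 - p := by omega
    rw [this]
  have hinner2 : ∀ p ∈ Finset.range (n + 1),
      ((PySem.List.pyRange 0 ((n : Int) + 1 - (p : Int)) 1).map (fun _ => (1 : Int))).sum
        = (n : Int) + 1 - p := by
    intro p hp
    have hple : p ≤ n := Nat.lt_succ_iff.mp (Finset.mem_range.mp hp)
    rw [pv_pyRange_sum]
    have h1 : ((n : Int) + 1 - (p : Int)).toNat = n + 1 - p := by omega
    rw [h1]
    simp
    push_cast [Nat.cast_sub (by omega : p ≤ n + 1)]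
    ring
  rw [Finset.sum_congr rfl hinner1, Finset.sum_congr rfl hinner2]
  -- the count
  have hcount : 2 * (∑ p ∈ Finset.range (n + 1), ((n : Int) + 1 - (p : Int)))
      = ((n : Int) + 1) * ((n : Int) + 2) := by
    have := pv_sum_lin ((n : Int) + 1) (n + 1)
    push_cast at this
    linear_combination this
  -- the total: pull out 16, then pair 2*dim with the product sum
  have hdim : ∀ p ∈ Finset.range (n + 1),
      (∑ q ∈ Finset.range (n + 1 - p), 16 * pvDimPq (p : Int) (q : Int))
        = 8 * ∑ q ∈ Finset.range (n + 1 - p),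
            ((p : Int) + 1) * ((q : Int) + 1) * ((p : Int) + (q : Int) + 2) := by
    intro p _
    rw [Finset.mul_sum]
    exact Finset.sum_congr rfl (fun q _ => by linear_combination 8 * pv_dim2 (p : Int) (q : Int))
  rw [Finset.sum_congr rfl hdim, ← Finset.mul_sum]
  have hnn : ¬ ((n : Int) < 0) := by omega
  simp only [N_PW_alt, if_neg hnn]
  -- name the two nested sums
  have hTprod : (∑ p ∈ Finset.range (n + 1),
      ∑ q ∈ Finset.range (n + 1 - p),
        ((p : Int) + 1) * ((q : Int) + 1) * ((p : Int) + (q : Int) + 2))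
      = 2 * ∑ p ∈ Finset.range (n + 1), ∑ q ∈ Finset.range (n + 1 - p), pvDimPq (p : Int) (q : Int) := by
    rw [Finset.mul_sum]
    refine Finset.sum_congr rfl (fun p _ => ?_)
    rw [Finset.mul_sum]
    exact Finset.sum_congr rfl (fun q _ => by linear_combination - pv_dim2 (p : Int) (q : Int))
  have hT := pv_sum_T n
  have hX : ((n : Int) + 2 - 1) * ((n : Int) + 2) * ((n : Int) + 2 + 1) * ((n : Int) + 2 + 2) * (2 * ((n : Int) + 2) + 1)
      = 120 * ∑ p ∈ Finset.range (n + 1), ∑ q ∈ Finset.range (n + 1 - p), pvDimPq (p : Int) (q : Int) := by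
    linear_combination - hT + 60 * hTprod
  have hC : ((n : Int) + 1) * ((n : Int) + 2)
      = 2 * ∑ p ∈ Finset.range (n + 1), ((n : Int) + 1 - (p : Int)) := by
    linear_combination - hcount
  rw [hX, hC, PySem.Int.floordiv_eq_ediv_of_pos (by norm_num : (0:Int) < 120),
      PySem.Int.floordiv_eq_ediv_of_pos (by norm_num : (0:Int) < 2),
      Int.mul_ediv_cancel_left _ (by norm_num : (120:Int) ≠ 0),
      Int.mul_ediv_cancel_left _ (by norm_num : (2:Int) ≠ 0), hTprod]
  ring_nf

-- ===== VERDICT (by name: the statement is the Claim_ definition above) =====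
theorem N_PW_spec : Claim_equal_N_PW := by
  intro L _
  unfold Spec_N_PW
  rcases lt_or_ge L 0 with hL | hL
  · rw [pv_N_PW_sums, PySem.List.pyRange_one_eq_nil (by omega)]
    rw [N_PW_alt, if_pos hL]
    simp
  · obtain ⟨n, rfl⟩ := Int.eq_ofNat_of_zero_le hL
    exact pv_main n
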